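-- pv_equiv track=rewrite | github.com/MrBrantCode/unitest_baseline | mut_generate/mist_train_cf/cf_83774/solution.py | sophisticated_seq
-- ===== SOURCE A (Python) =====
-- from typing import List, Tuple
--
-- def sophisticated_seq(arr: List[int]) -> List[Tuple[int, int]]:
--     if len(arr) == 0:
--         return [( -1, -1)]
--     derivation = []
--     for i in range(len(arr)-1):
--         if arr[i] >= arr[i+1]:
--             immediate_greater, immediate_greater_index = -float('inf'), -1
--             for j in range(i+1, len(arr)):
--                 if immediate_greater < arr[j] <= arr[i]:
--                     immediate_greater, immediate_greater_index = arr[j], j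
--             if immediate_greater_index != -1:
--                 derivation.append((i, immediate_greater_index))
--     if not derivation:
--         derivation = [(-1, -1)]
--     return derivation
-- ===== SOURCE B (Python) =====
-- from typing import List, Tuple
-- from bisect import bisect_right, insort
--
-- def sophisticated_seq(arr: List[int]) -> List[Tuple[int, int]]:
--     # One right-to-left pass: maintain the distinct suffix values in a sorted
--     # list (predecessor query by bisect) and a dict value -> earliest index.
--     vals = []            # sorted distinct values of arr[i+1:]
--     first = {}           # value -> smallest index j > i with arr[j] == value
--     out = []
--     for i in range(len(arr) - 2, -1, -1):
--         v = arr[i + 1]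
--         if v not in first:
--             insort(vals, v)
--         first[v] = i + 1
--         if arr[i] >= v:
--             k = bisect_right(vals, arr[i]) - 1
--             out.append((i, first[vals[k]]))
--     out.reverse()
--     return out if out else [(-1, -1)]
-- ===== Notes on version B (the rewrite author's own statement) =====
-- stated objective: faster
-- what changed: Replaces the per-descent O(n) rescan of the suffix by a single right-to-left pass that maintains a sorted list of distinct suffix values (predecessor query via bisect) plus a dict mapping each value to its earliest suffix index.
import Mathlib
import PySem

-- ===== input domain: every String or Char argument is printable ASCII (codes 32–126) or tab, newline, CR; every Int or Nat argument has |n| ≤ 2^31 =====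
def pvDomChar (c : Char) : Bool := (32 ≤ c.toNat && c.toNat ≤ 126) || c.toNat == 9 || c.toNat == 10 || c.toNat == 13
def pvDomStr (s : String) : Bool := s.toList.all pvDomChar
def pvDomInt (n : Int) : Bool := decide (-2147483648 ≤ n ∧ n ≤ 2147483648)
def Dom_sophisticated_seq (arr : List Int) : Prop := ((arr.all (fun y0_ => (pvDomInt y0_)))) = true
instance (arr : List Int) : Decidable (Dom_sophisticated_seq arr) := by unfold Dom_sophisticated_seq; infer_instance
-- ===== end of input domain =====

-- B replaces A's per-descent O(n) rescan of the suffix by one right-to-left pass keeping a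
-- sorted list of the distinct suffix values (predecessor by bisect) and a dict value → earliest index.

-- ===== PORT A =====
-- Literal port of A: -float('inf') is modelled as `none` (none < every int), so the inner
-- accumulator is (Option Int × Int).
def sophisticated_seq (arr : List Int) : List (Int × Int) :=
  if arr.length = 0 then [(-1, -1)]
  else
    let derivation :=
      (PySem.List.pyRange 0 ((arr.length : Int) - 1) 1).foldl (fun der i =>
        if PySem.List.pyGetD arr i 0 ≥ PySem.List.pyGetD arr (i + 1) 0 then
          let p :=
            (PySem.List.pyRange (i + 1) (arr.length : Int) 1).foldl
              (fun (p : Option Int × Int) j =>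
                if (p.1.all fun g => decide (g < PySem.List.pyGetD arr j 0)) &&
                    decide (PySem.List.pyGetD arr j 0 ≤ PySem.List.pyGetD arr i 0) then
                  (some (PySem.List.pyGetD arr j 0), j)
                else p)
              (none, -1)
          if p.2 ≠ -1 then der ++ [(i, p.2)] else der
        else der) ([] : List (Int × Int))
    if derivation = [] then [(-1, -1)] else derivation

-- ===== PORT B =====
-- Literal port of Source B; insort(vals, v) is list.insert at bisect_right (PySem.List.insert /
-- PySem.List.bisectRight), the dict is PySem.Dict.
def sophisticated_seq_alt (arr : List Int) : List (Int × Int) :=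
  let res :=
    (PySem.List.pyRange ((arr.length : Int) - 2) (-1) (-1)).foldl
      (fun (st : List Int × PySem.Dict Int Int × List (Int × Int)) i =>
        let v := PySem.List.pyGetD arr (i + 1) 0
        let vals :=
          if st.2.1.contains v then st.1
          else PySem.List.insert st.1 ((PySem.List.bisectRight st.1 v : Nat) : Int) v
        let first := st.2.1.insert v (i + 1)
        if PySem.List.pyGetD arr i 0 ≥ v then
          let k : Int := ((PySem.List.bisectRight vals (PySem.List.pyGetD arr i 0) : Nat) : Int) - 1
          (vals, first, st.2.2 ++ [(i, first.getD (PySem.List.pyGetD vals k 0) 0)])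
        else (vals, first, st.2.2))
      ([], PySem.Dict.empty, [])
  let out := res.2.2.reverse
  if out = [] then [(-1, -1)] else out

-- ===== PRECONDITION & SPEC =====
def Spec_sophisticated_seq (arr : List Int) (out : List (Int × Int)) : Prop := out = sophisticated_seq_alt arr
instance (arr : List Int) (out : List (Int × Int)) : Decidable (Spec_sophisticated_seq arr out) := by unfold Spec_sophisticated_seq; infer_instance

-- ===== CLAIM (what is proved, stated in full; the proofs are below) =====
def Claim_equal_sophisticated_seq : Prop := ∀ (arr : List Int), Dom_sophisticated_seq arr → Spec_sophisticated_seq arr (sophisticated_seq arr)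

-- ===== LEMMAS AND PROOFS =====

-- `bestVI x s l` : simultaneous maximum-value / earliest-position search over the values l
-- (positions s, s+1, …): the largest value ≤ x together with the position of its first occurrence.
def bestVI (x : Int) (s : Int) : List Int → Option (Int × Int)
  | [] => none
  | v :: t =>
    let r := bestVI x (s + 1) t
    if decide (v ≤ x) && (match r with | none => true | some p => decide (p.1 ≤ v)) then
      some (v, s)
    else r

-- what both programs compute for outer index i (when the descent guard holds)
def rfun (arr : List Int) (i : Nat) : Option (Int × Int) :=
  if arr.getD (i + 1) 0 ≤ arr.getD i 0 then
    (bestVI (arr.getD i 0) ((i : Int) + 1) (arr.drop (i + 1))).map (fun p => ((i : Int), p.2))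
  else none

def refList (arr : List Int) : List (Int × Int) :=
  (List.range (arr.length - 1)).filterMap (rfun arr)

theorem bestVI_isSome (x : Int) : ∀ (l : List Int) (s : Int) (v : Int),
    v ∈ l → v ≤ x → (bestVI x s l).isSome := by
  intro l
  induction l with
  | nil => intro s v h; simp at h
  | cons u t ih =>
    intro s v hv hvx
    simp only [bestVI]
    cases hr : bestVI x (s + 1) t with
    | none =>
      rcases List.mem_cons.1 hv with h1 | h1
      · subst h1; simp [hvx]
      · have := ih (s + 1) v h1 hvx
        rw [hr] at this; simp at this
    | some p =>
      by_cases hc : u ≤ x ∧ p.1 ≤ u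
      · simp [hc.1, hc.2]
      · rcases Decidable.em (u ≤ x) with hux | hux
        · have : ¬ p.1 ≤ u := fun hh => hc ⟨hux, hh⟩
          rw [if_neg (by simp [this])]; simp
        · rw [if_neg (by simp [hux])]; simp

theorem bestVI_some_spec (x : Int) : ∀ (l : List Int) (s : Int) (m j : Int),
    bestVI x s l = some (m, j) →
    m ∈ l ∧ m ≤ x ∧ (∀ w ∈ l, w ≤ x → w ≤ m) ∧ j = s + (l.idxOf m : Int) := by
  intro l
  induction l with
  | nil => intro s m j h; simp [bestVI] at h
  | cons v t ih =>
    intro s m j h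
    simp only [bestVI] at h
    cases hr : bestVI x (s + 1) t with
    | none =>
      rw [hr] at h
      by_cases hvx : v ≤ x
      · simp [hvx] at h
        obtain ⟨hm, hj⟩ := h
        subst hm; subst hj
        refine ⟨List.mem_cons_self, hvx, ?_, by simp⟩
        intro w hw hwx
        rcases List.mem_cons.1 hw with h1 | h1
        · omega
        · have := bestVI_isSome x t (s + 1) w h1 hwx
          rw [hr] at this; simp at this
      · simp [hvx] at h
    | some p =>
      rw [hr] at h
      obtain ⟨hp1, hp2, hp3, hp4⟩ := ih (s + 1) p.1 p.2 (by rw [hr])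
      by_cases hcond : v ≤ x ∧ p.1 ≤ v
      · rw [if_pos (by simp [hcond.1, hcond.2])] at h
        obtain ⟨hm, hj⟩ := Prod.mk.injEq .. ▸ (Option.some.injEq .. ▸ h)
        subst hm; subst hj
        refine ⟨List.mem_cons_self, hcond.1, ?_, by simp⟩
        intro w hw hwx
        rcases List.mem_cons.1 hw with h1 | h1
        · omega
        · exact le_trans (hp3 w h1 hwx) hcond.2
      · have hres : p = (m, j) := by
          rcases Decidable.em (v ≤ x) with hvx | hvx
          · have hcond2 : ¬ p.1 ≤ v := fun hc => hcond ⟨hvx, hc⟩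
            rw [if_neg (by simp [hcond2])] at h
            exact Option.some_inj.1 h
          · rw [if_neg (by simp [hvx])] at h
            exact Option.some_inj.1 h
        have hP1 : p.1 = m := by rw [hres]
        have hP2 : p.2 = j := by rw [hres]
        rw [hP1] at hp1 hp2 hp3 hcond
        rw [hP1, hP2] at hp4
        have hne : m ≠ v := by
          rcases Decidable.em (v ≤ x) with hvx | hvx
          · have : ¬ m ≤ v := fun hc => hcond ⟨hvx, hc⟩
            omega
          · omega
        refine ⟨List.mem_cons_of_mem _ hp1, hp2, ?_, ?_⟩
        · intro w hw hwx
          rcases List.mem_cons.1 hw with h1 | h1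
          · rcases Decidable.em (v ≤ x) with hvx | hvx
            · have h2 : ¬ m ≤ v := fun hc => hcond ⟨hvx, hc⟩
              omega
            · omega
          · exact hp3 w h1 hwx
        · rw [List.idxOf_cons_ne _ (Ne.symm hne), hp4]
          push_cast [Nat.succ_eq_add_one]
          ring



-- A's inner loop, with any accumulator, is `combine` of the accumulator with bestVI.
def combineA (acc : Option Int × Int) : Option (Int × Int) → Option Int × Int
  | none => acc
  | some (m, j) => if acc.1.all (fun g => decide (g < m)) then (some m, j) else acc

theorem innerA (arr : List Int) (x : Int) : ∀ (t s : Nat) (acc : Option Int × Int),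
    s + t = arr.length →
    ((PySem.List.pyRange ((s : Int)) ((arr.length : Int)) 1).foldl
      (fun (p : Option Int × Int) j =>
        if (p.1.all fun g => decide (g < PySem.List.pyGetD arr j 0)) &&
            decide (PySem.List.pyGetD arr j 0 ≤ x) then
          (some (PySem.List.pyGetD arr j 0), j)
        else p) acc)
    = combineA acc (bestVI x (s : Int) (arr.drop s)) := by
  intro t
  induction t with
  | zero =>
    intro s acc hs
    have h1 : PySem.List.pyRange (s : Int) (arr.length : Int) 1 = [] := by
      rw [PySem.List.pyRange_of_pos _ _ (by norm_num : (0:Int) < 1)]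
      rw [if_neg (by exact_mod_cast Nat.not_lt.mpr (by omega))]
      simp
    have h2 : arr.drop s = [] := by
      apply List.drop_eq_nil_of_le; omega
    rw [h1, h2]
    simp [bestVI, combineA]
  | succ t ih =>
    intro s acc hs
    have hsl : s < arr.length := by omega
    have hlt : ((s : Nat) : Int) < (arr.length : Int) := by exact_mod_cast hsl
    rw [PySem.List.pyRange_one_cons hlt]
    simp only [List.foldl_cons]
    have hc : ((s : Nat) : Int) + 1 = (((s + 1 : Nat)) : Int) := by push_cast; ring
    rw [hc, ih (s + 1) _ (by omega)]
    rw [List.drop_eq_getElem_cons hsl]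
    have hget : PySem.List.pyGetD arr ((s : Nat) : Int) 0 = arr[s] := by
      rw [PySem.List.pyGetD_natCast]; exact List.getD_eq_getElem _ _ hsl
    rw [hget]
    simp only [bestVI, ← hc]
    set v := arr[s] with hv
    set r := bestVI x (((s : Nat) : Int) + 1) (arr.drop (s + 1)) with hrdef
    rcases acc with ⟨g?, gi⟩
    cases hg : g? with
    | none =>
      cases hr : r with
      | none => by_cases hvx : v ≤ x <;> simp [combineA, hvx]
      | some p =>
        rcases p with ⟨m, j⟩
        by_cases hvx : v ≤ x
        · by_cases hmv : m ≤ v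
          · have hvm : ¬ v < m := by omega
            simp [combineA, hvx, hmv, hvm]
          · have hvm : v < m := by omega
            simp [combineA, hvx, hmv, hvm]
        · simp [combineA, hvx]
    | some g =>
      cases hr : r with
      | none =>
        by_cases hvx : v ≤ x
        · by_cases hgv : g < v <;> simp [combineA, hvx, hgv]
        · by_cases hgv : g < v <;> simp [combineA, hvx, hgv]
      | some p =>
        rcases p with ⟨m, j⟩
        by_cases hvx : v ≤ x
        · by_cases hmv : m ≤ v
          · by_cases hgv : g < v
            · simp [combineA, hvx, hmv, hgv]
            · have hgm : ¬ g < m := by omega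
              simp [combineA, hvx, hmv, hgv, hgm]
          · by_cases hgv : g < v
            · have hgm : g < m := by omega
              have hvm : v < m := by omega
              simp [combineA, hvx, hmv, hgv, hgm, hvm]
            · simp [combineA, hvx, hmv, hgv]
        · simp [combineA, hvx]

theorem flatMap_toList_eq_filterMap {α β : Type} (f : α → Option β) (l : List α) :
    l.flatMap (fun a => (f a).toList) = l.filterMap f := by
  induction l with
  | nil => rfl
  | cons a t ih => cases h : f a <;> simp [List.flatMap_cons, h, ih]

-- A computes refList (then maps [] to [(-1,-1)]).
theorem A_eq_ref (arr : List Int) :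
    sophisticated_seq arr = if refList arr = [] then [(-1, -1)] else refList arr := by
  by_cases h0 : arr.length = 0
  · have harr : arr = [] := List.eq_nil_of_length_eq_zero h0
    subst harr
    simp [sophisticated_seq, refList]
  · unfold sophisticated_seq
    rw [if_neg h0]
    have hn1 : (arr.length : Int) - 1 = ((arr.length - 1 : Nat) : Int) := by
      have := Nat.pos_of_ne_zero h0; omega
    rw [hn1, PySem.List.pyRange_zero_natCast, List.foldl_map]
    rw [PySem.List.foldl_congr_mem _ _
      (fun (der : List (Int × Int)) (i : Nat) => der ++ (rfun arr i).toList) _ ?hb]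
    · rw [PySem.List.foldl_append_eq_flatMap, flatMap_toList_eq_filterMap]
      rfl
    case hb =>
      intro der i hi
      have hi1 : i + 1 < arr.length := by
        have := List.mem_range.1 hi; omega
      have hgi : PySem.List.pyGetD arr ((i : Nat) : Int) 0 = arr.getD i 0 :=
        PySem.List.pyGetD_natCast arr i 0
      have hci : ((i : Nat) : Int) + 1 = (((i + 1 : Nat)) : Int) := by push_cast; ring
      simp only [hgi, hci, PySem.List.pyGetD_natCast, ge_iff_le]
      by_cases hg : arr.getD (i + 1) 0 ≤ arr.getD i 0
      · rw [if_pos hg]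
        rw [innerA arr (arr.getD i 0) (arr.length - (i + 1)) (i + 1) (none, -1) (by omega)]
        have hmem : arr.getD (i + 1) 0 ∈ arr.drop (i + 1) := by
          rw [List.drop_eq_getElem_cons hi1, List.getD_eq_getElem _ _ hi1]
          exact List.mem_cons_self
        have hsome := bestVI_isSome (arr.getD i 0) (arr.drop (i + 1))
          (((i + 1 : Nat)) : Int) _ hmem hg
        cases hbv : bestVI (arr.getD i 0) (((i + 1 : Nat)) : Int) (arr.drop (i + 1)) with
        | none => rw [hbv] at hsome; simp at hsome
        | some q =>
          rcases q with ⟨m, j⟩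
          obtain ⟨_, _, _, hj⟩ := bestVI_some_spec _ _ _ _ _ hbv
          have hcomb : combineA (none, -1) (some (m, j)) = (some m, j) := by
            simp [combineA]
          rw [hcomb]
          have hjne : j ≠ -1 := by omega
          rw [if_pos hjne]
          simp only [rfun, hci]
          rw [if_pos hg, hbv]
          simp
      · rw [if_neg hg]
        simp only [rfun, if_neg hg]
        simp

-- ---- B side ----

-- python's list.insert at a cast Nat index ≤ len
theorem insert_natCast (xs : List Int) (b : Nat) (v : Int) (hb : b ≤ xs.length) :
    PySem.List.insert xs ((b : Nat) : Int) v = xs.take b ++ v :: xs.drop b := by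
  simp only [PySem.List.insert, PySem.List.sliceIndices]
  norm_num
  rw [if_neg (by omega), min_eq_left (by exact_mod_cast hb)]
  simp

theorem insort_spec (xs : List Int) (v : Int) (hs : xs.Pairwise (· < ·)) (hv : v ∉ xs) :
    (PySem.List.insert xs ((PySem.List.bisectRight xs v : Nat) : Int) v).Pairwise (· < ·) ∧
    ∀ w, w ∈ PySem.List.insert xs ((PySem.List.bisectRight xs v : Nat) : Int) v ↔ w = v ∨ w ∈ xs := by
  have hle : xs.Pairwise (· ≤ ·) := hs.imp (fun h => le_of_lt h)
  obtain ⟨hb1, hb2, hb3⟩ := PySem.List.bisectRight_spec xs v hle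
  set b := PySem.List.bisectRight xs v with hbdef
  rw [insert_natCast xs b v hb1]
  have hlt_v : ∀ (p : Nat) (hp : p < xs.length), p < b → xs[p] < v := by
    intro p hp hpb
    exact lt_of_le_of_ne (hb2 p hp hpb) (fun he => hv (he ▸ List.getElem_mem hp))
  have hgE := List.pairwise_iff_getElem.1 hs
  constructor
  · rw [List.pairwise_append]
    refine ⟨hs.sublist (List.take_sublist _ _), ?_, ?_⟩
    · rw [List.pairwise_cons]
      refine ⟨?_, hs.sublist (List.drop_sublist _ _)⟩
      intro w hw
      obtain ⟨t, ht, rfl⟩ := List.mem_iff_getElem.1 hw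
      rw [List.getElem_drop]
      exact hb3 _ _ (by omega)
    · intro a ha w hw
      obtain ⟨p, hp, rfl⟩ := List.mem_iff_getElem.1 ha
      have hpb : p < b := by simp at hp; omega
      rw [List.getElem_take]
      rcases List.mem_cons.1 hw with rfl | hw'
      · exact hlt_v p (by omega) hpb
      · obtain ⟨t, ht, rfl⟩ := List.mem_iff_getElem.1 hw'
        rw [List.getElem_drop]
        exact hgE p (b + t) (by omega) (by simp at ht hp; omega) (by simp at hp; omega)
  · intro w
    constructor
    · intro hw
      rcases List.mem_append.1 hw with h1 | h1
      · exact Or.inr (List.mem_of_mem_take h1)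
      · rcases List.mem_cons.1 h1 with rfl | h1
        · exact Or.inl rfl
        · exact Or.inr (List.mem_of_mem_drop h1)
    · intro hw
      rcases hw with rfl | hw
      · exact List.mem_append.2 (Or.inr List.mem_cons_self)
      · rw [← List.take_append_drop b xs] at hw
        rcases List.mem_append.1 hw with h1 | h1
        · exact List.mem_append.2 (Or.inl h1)
        · exact List.mem_append.2 (Or.inr (List.mem_cons_of_mem _ h1))

-- the predecessor query on a strictly sorted list whose members are the suffix values
theorem query_spec (vals : List Int) (x : Int)
    (hs : vals.Pairwise (· < ·)) (l : List Int) (hmem : ∀ w, w ∈ vals ↔ w ∈ l)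
    (m : Int) (hm : m ∈ l) (hmx : m ≤ x) (hmax : ∀ w ∈ l, w ≤ x → w ≤ m) :
    PySem.List.pyGetD vals (((PySem.List.bisectRight vals x : Nat) : Int) - 1) 0 = m := by
  have hle : vals.Pairwise (· ≤ ·) := hs.imp (fun h => le_of_lt h)
  obtain ⟨hb1, hb2, hb3⟩ := PySem.List.bisectRight_spec vals x hle
  set b := PySem.List.bisectRight vals x with hbdef
  have hmv : m ∈ vals := (hmem m).2 hm
  obtain ⟨pm, hpm, hpmE⟩ := List.mem_iff_getElem.1 hmv
  have hpmb : pm < b := by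
    by_contra hc
    have := hb3 pm hpm (Nat.le_of_not_lt hc)
    rw [hpmE] at this; omega
  have hbpos : 0 < b := by omega
  have hb1' : b - 1 < vals.length := by omega
  have hcast : ((b : Nat) : Int) - 1 = ((b - 1 : Nat) : Int) := by omega
  rw [hcast, PySem.List.pyGetD_natCast, List.getD_eq_getElem _ _ hb1']
  have h1 : vals[b - 1] ≤ x := hb2 (b - 1) hb1' (by omega)
  have h2 : vals[b - 1] ≤ m := hmax _ ((hmem _).1 (List.getElem_mem hb1')) h1
  have h3 : m ≤ vals[b - 1] := by
    rcases Nat.lt_or_ge pm (b - 1) with hlt | hge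
    · have := List.pairwise_iff_getElem.1 hs pm (b - 1) hpm hb1' hlt
      rw [hpmE] at this; omega
    · have hpe : pm = b - 1 := by omega
      subst hpe
      rw [hpmE]
  omega

-- loop invariant for B's backward pass over suffix arr[k+1:]
def InvB (arr : List Int) (k : Nat) (vals : List Int) (first : PySem.Dict Int Int) : Prop :=
  vals.Pairwise (· < ·) ∧ (∀ w, w ∈ vals ↔ w ∈ arr.drop (k + 1)) ∧
  (∀ w, first.get? w = if w ∈ arr.drop (k + 1) then
      some (((k + 1 : Nat) : Int) + ((arr.drop (k + 1)).idxOf w : Int)) else none)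

def stepFn (arr : List Int) : (List Int × PySem.Dict Int Int × List (Int × Int)) → Int → (List Int × PySem.Dict Int Int × List (Int × Int)) :=
  (fun (st : List Int × PySem.Dict Int Int × List (Int × Int)) i =>
        let v := PySem.List.pyGetD arr (i + 1) 0
        let vals :=
          if st.2.1.contains v then st.1
          else PySem.List.insert st.1 ((PySem.List.bisectRight st.1 v : Nat) : Int) v
        let first := st.2.1.insert v (i + 1)
        if PySem.List.pyGetD arr i 0 ≥ v then
          let k : Int := ((PySem.List.bisectRight vals (PySem.List.pyGetD arr i 0) : Nat) : Int) - 1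
          (vals, first, st.2.2 ++ [(i, first.getD (PySem.List.pyGetD vals k 0) 0)])
        else (vals, first, st.2.2))

theorem stepB (arr : List Int) (m : Nat) (hm : m + 1 < arr.length)
    (vals : List Int) (first : PySem.Dict Int Int) (out : List (Int × Int))
    (hInv : InvB arr (m + 1) vals first) :
    (stepFn arr (vals, first, out) ((m : Nat) : Int)).2.2 = out ++ (rfun arr m).toList
    ∧ InvB arr m (stepFn arr (vals, first, out) ((m : Nat) : Int)).1
        (stepFn arr (vals, first, out) ((m : Nat) : Int)).2.1 := by
  obtain ⟨hsort, hmemv, hfirst⟩ := hInv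
  have hcm : ((m : Nat) : Int) + 1 = (((m + 1 : Nat)) : Int) := by push_cast; ring
  have hgv : PySem.List.pyGetD arr (((m : Nat) : Int) + 1) 0 = arr.getD (m + 1) 0 := by
    rw [hcm, PySem.List.pyGetD_natCast]
  have hgm : PySem.List.pyGetD arr ((m : Nat) : Int) 0 = arr.getD m 0 :=
    PySem.List.pyGetD_natCast arr m 0
  set v := arr.getD (m + 1) 0 with hvdef
  have hvE : arr[m + 1] = v := (List.getD_eq_getElem arr 0 hm).symm
  have hdrop : arr.drop (m + 1) = v :: arr.drop (m + 2) := by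
    rw [List.drop_eq_getElem_cons hm, hvE]
  have hcont : first.contains v = decide (v ∈ arr.drop (m + 2)) := by
    rw [PySem.Dict.contains_eq_isSome_get?, hfirst v]
    by_cases h : v ∈ arr.drop (m + 2) <;> simp [h]
  set vals1 := if first.contains v then vals
      else PySem.List.insert vals ((PySem.List.bisectRight vals v : Nat) : Int) v with hvals1
  have hvprops : vals1.Pairwise (· < ·) ∧ ∀ w, w ∈ vals1 ↔ w ∈ arr.drop (m + 1) := by
    by_cases hc : v ∈ arr.drop (m + 2)
    · rw [hvals1, hcont, if_pos (by simp [hc])]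
      refine ⟨hsort, fun w => ?_⟩
      rw [hmemv w, hdrop, List.mem_cons]
      constructor
      · exact Or.inr
      · rintro (rfl | hw) <;> [exact hc; exact hw]
    · have hnv : v ∉ vals := fun hw => hc ((hmemv v).1 hw)
      obtain ⟨hins1, hins2⟩ := insort_spec vals v hsort hnv
      rw [hvals1, hcont, if_neg (by simp [hc])]
      refine ⟨hins1, fun w => ?_⟩
      rw [hins2 w, hmemv w, hdrop, List.mem_cons]
  obtain ⟨hs1, hmem1⟩ := hvprops
  set first1 := first.insert v (((m : Nat) : Int) + 1) with hfirst1def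
  have hf1 : ∀ w, first1.get? w = if w ∈ arr.drop (m + 1) then
      some ((((m + 1 : Nat)) : Int) + ((arr.drop (m + 1)).idxOf w : Int)) else none := by
    intro w
    rw [hfirst1def, PySem.Dict.get?_insert]
    by_cases hw : w = v
    · subst hw
      rw [if_pos rfl, if_pos (by rw [hdrop]; exact List.mem_cons_self)]
      rw [hdrop, List.idxOf_cons_self]
      simp
    · rw [if_neg hw, hfirst w]
      by_cases hw2 : w ∈ arr.drop (m + 2)
      · rw [if_pos hw2, if_pos (by rw [hdrop]; exact List.mem_cons_of_mem _ hw2)]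
        rw [hdrop, List.idxOf_cons_ne _ (fun he => hw he.symm)]
        congr 1
        push_cast [Nat.succ_eq_add_one]
        ring
      · rw [if_neg hw2, if_neg (by rw [hdrop, List.mem_cons]; rintro (rfl | hh) <;> [exact hw rfl; exact hw2 hh])]
  by_cases hguard : v ≤ arr.getD m 0
  · have hvmem : v ∈ arr.drop (m + 1) := by rw [hdrop]; exact List.mem_cons_self
    have hbs := bestVI_isSome (arr.getD m 0) (arr.drop (m + 1)) (((m + 1 : Nat)) : Int) v hvmem hguard
    obtain ⟨⟨mv, j⟩, hbv⟩ : ∃ p, bestVI (arr.getD m 0) (((m + 1 : Nat)) : Int) (arr.drop (m + 1)) = some p := by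
      cases h : bestVI (arr.getD m 0) (((m + 1 : Nat)) : Int) (arr.drop (m + 1)) with
      | none => rw [h] at hbs; simp at hbs
      | some p => exact ⟨p, rfl⟩
    obtain ⟨hmv1, hmv2, hmv3, hj⟩ := bestVI_some_spec _ _ _ _ _ hbv
    have hquery : PySem.List.pyGetD vals1
        (((PySem.List.bisectRight vals1 (arr.getD m 0) : Nat) : Int) - 1) 0 = mv :=
      query_spec vals1 _ hs1 _ hmem1 mv hmv1 hmv2 hmv3
    have hgetD : first1.getD mv 0 = j := by
      rw [PySem.Dict.getD_eq_get?_getD, hf1 mv, if_pos hmv1]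
      simp [hj]
    have hstepE : stepFn arr (vals, first, out) ((m : Nat) : Int)
        = (vals1, first1, out ++ [(((m : Nat) : Int), j)]) := by
      simp only [stepFn, ge_iff_le]
      rw [hgv, hgm, ← hvals1, ← hfirst1def]
      rw [if_pos hguard, hquery, hgetD]
    rw [hstepE]
    refine ⟨?_, hs1, hmem1, hf1⟩
    simp only [rfun, ← hvdef]
    rw [if_pos hguard, hcm, hbv]
    simp
  · have hstepE : stepFn arr (vals, first, out) ((m : Nat) : Int)
        = (vals1, first1, out) := by
      simp only [stepFn, ge_iff_le]
      rw [hgv, hgm, ← hvals1, ← hfirst1def]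
      rw [if_neg hguard]
    rw [hstepE]
    refine ⟨?_, hs1, hmem1, hf1⟩
    simp only [rfun, ← hvdef]
    rw [if_neg hguard]
    simp

theorem loopB (arr : List Int) : ∀ (m : Nat), m ≤ arr.length - 1 →
    ∀ vals first out, InvB arr m vals first →
    (((List.range m).reverse.map (fun j => ((j : Nat) : Int))).foldl (stepFn arr) (vals, first, out)).2.2
      = out ++ ((List.range m).reverse).filterMap (rfun arr) := by
  intro m
  induction m with
  | zero => intro _ vals first out _; simp
  | succ k ih =>
    intro hm vals first out hInv
    have hk1 : k + 1 < arr.length := by omega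
    have hsplit : (List.range (k + 1)).reverse.map (fun j => ((j : Nat) : Int))
        = ((k : Nat) : Int) :: (List.range k).reverse.map (fun j => ((j : Nat) : Int)) := by
      rw [List.range_succ, List.reverse_append]; simp
    rw [hsplit, List.foldl_cons]
    obtain ⟨h1, h2⟩ := stepB arr k hk1 vals first out hInv
    have h3 := ih (by omega) _ _ (stepFn arr (vals, first, out) ((k : Nat) : Int)).2.2 h2
    simp only [Prod.mk.eta] at h3
    rw [h3, h1]
    rw [List.range_succ, List.reverse_append]
    cases hr : rfun arr k <;> simp [hr, List.append_assoc]

theorem pyRange_desc (n : Nat) :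
    PySem.List.pyRange ((n : Int) - 2) (-1) (-1)
      = (List.range (n - 1)).reverse.map (fun j => ((j : Nat) : Int)) := by
  simp only [PySem.List.pyRange]
  rw [if_neg (by norm_num)]
  by_cases h2 : 2 ≤ n
  · rw [if_neg (by norm_num), if_pos (by omega)]
    have hc : (((n : Int) - 2 - -1 + - -1 - 1) / - -1).toNat = n - 1 := by
      norm_num
      omega
    rw [hc]
    apply List.ext_getElem
    · simp
    · intro i hi1 hi2
      simp at hi1 hi2 ⊢
      omega
  · rw [if_neg (by norm_num), if_neg (by omega)]
    have hn1 : n - 1 = 0 := by omega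
    rw [hn1]
    simp

theorem B_eq_ref (arr : List Int) :
    sophisticated_seq_alt arr = if refList arr = [] then [(-1, -1)] else refList arr := by
  unfold sophisticated_seq_alt
  rw [show (fun (st : List Int × PySem.Dict Int Int × List (Int × Int)) (i : Int) =>
        let v := PySem.List.pyGetD arr (i + 1) 0
        let vals :=
          if st.2.1.contains v then st.1
          else PySem.List.insert st.1 ((PySem.List.bisectRight st.1 v : Nat) : Int) v
        let first := st.2.1.insert v (i + 1)
        if PySem.List.pyGetD arr i 0 ≥ v then
          let k : Int := ((PySem.List.bisectRight vals (PySem.List.pyGetD arr i 0) : Nat) : Int) - 1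
          (vals, first, st.2.2 ++ [(i, first.getD (PySem.List.pyGetD vals k 0) 0)])
        else (vals, first, st.2.2)) = stepFn arr from rfl]
  rw [pyRange_desc arr.length]
  have hInv0 : InvB arr (arr.length - 1) [] PySem.Dict.empty := by
    refine ⟨List.Pairwise.nil, ?_, ?_⟩
    · intro w
      rw [List.drop_eq_nil_of_le (by omega)]
    · intro w
      rw [List.drop_eq_nil_of_le (by omega)]
      simp [PySem.Dict.get?_empty]
  show (if (List.foldl (stepFn arr) ([], PySem.Dict.empty, [])
        ((List.range (arr.length - 1)).reverse.map (fun j => ((j : Nat) : Int)))).2.2.reverse = []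
      then [(-1, -1)]
      else (List.foldl (stepFn arr) ([], PySem.Dict.empty, [])
        ((List.range (arr.length - 1)).reverse.map (fun j => ((j : Nat) : Int)))).2.2.reverse)
      = if refList arr = [] then [(-1, -1)] else refList arr
  rw [loopB arr (arr.length - 1) (le_refl _) [] PySem.Dict.empty [] hInv0]
  rw [List.nil_append, List.filterMap_reverse, List.reverse_reverse]
  rfl

-- ===== VERDICT (by name: the statement is the Claim_ definition above) =====
theorem sophisticated_seq_spec : Claim_equal_sophisticated_seq := by
  intro arr _
  unfold Spec_sophisticated_seq
  rw [A_eq_ref, B_eq_ref]
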